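-- pv_equiv track=rewrite | github.com/maddencs/leet_code | string_to_integer.py | _find_number_end
-- ===== SOURCE A (Python) =====
-- def _find_number_end(s, number_start):
--     i = number_start + 1
--     number_chars = [str(n) for n in range(10)]
--
--     while i < len(s):
--         if s[i] not in number_chars:
--             return i
--         i += 1
--     return i
-- ===== SOURCE B (Python) =====
-- _DIGITS = "0123456789"
--
-- def _find_number_end(s, number_start):
--     i = number_start + 1
--     if i >= len(s):
--         return i
--     return len(s) - len(s[i:].lstrip(_DIGITS))
-- ===== Notes on version B (the rewrite author's own statement) =====
-- stated objective: idiomatic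
-- what changed: Replaced the explicit index while-loop with its per-character membership test against a built list of digit strings by a single slice-and-lstrip: the end of the digit run is len(s) minus the length of s[i:] with its leading digits stripped.
-- outside the precondition, e.g. on _find_number_end('xy', -2): A returns -1, B returns 1; on _find_number_end('12', -5): A raises IndexError, B returns 2
import Mathlib
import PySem

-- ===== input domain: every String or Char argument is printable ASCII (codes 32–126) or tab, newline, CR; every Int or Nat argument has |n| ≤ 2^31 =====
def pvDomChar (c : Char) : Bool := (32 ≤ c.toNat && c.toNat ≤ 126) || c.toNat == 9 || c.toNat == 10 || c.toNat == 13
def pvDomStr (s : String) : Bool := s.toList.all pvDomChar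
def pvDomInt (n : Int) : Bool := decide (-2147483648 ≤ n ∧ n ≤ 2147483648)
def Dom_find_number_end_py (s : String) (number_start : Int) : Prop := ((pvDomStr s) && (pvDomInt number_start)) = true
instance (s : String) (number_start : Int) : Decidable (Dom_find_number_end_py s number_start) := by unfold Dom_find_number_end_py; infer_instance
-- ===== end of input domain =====

-- B replaces A's index while-loop (membership test against a built list of digit strings)
-- by one slice-and-lstrip: idiomatic, no claim of speed; return values only, no mutation.

-- ===== PORT A =====
-- the while-loop of A: fuel bounds the iterations, the loop itself exits on its own condition;
-- `none` from pyGet? is Python's IndexError (excluded by Pre_), the value returned there is irrelevant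
def pvLoopA (l : List Char) (digits : List String) (i : Int) : Nat → Int
  | 0 => i
  | fuel + 1 =>
    if i < (l.length : Int) then
      match PySem.List.pyGet? l i with
      | some c => if String.ofList [c] ∈ digits then pvLoopA l digits (i + 1) fuel else i
      | none => i
    else i

def find_number_end_py (s : String) (number_start : Int) : Int :=
  let i := number_start + 1
  let number_chars := (PySem.List.pyRange 0 10 1).map PySem.Int.toStr
  pvLoopA s.toList number_chars i (((s.toList.length : Int) - i).toNat + 1)

-- ===== PORT B =====
def find_number_end_py_alt (s : String) (number_start : Int) : Int :=
  let i := number_start + 1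
  if i ≥ (s.toList.length : Int) then i
  else
    -- s[i:].lstrip("0123456789"): lstrip removes the leading chars belonging to the set
    (s.toList.length : Int) -
      (((PySem.List.slice s.toList (some i) none).dropWhile
          (fun c => ("0123456789".toList).contains c)).length : Int)

-- ===== PRECONDITION & SPEC =====
-- Pre_ restricts to the helper's natural domain number_start ≥ -1 (scan starts at index ≥ 0);
-- for smaller starts A either raises IndexError or returns via Python's negative-index wraparound.
def Pre_find_number_end_py (s : String) (number_start : Int) : Prop := -1 ≤ number_start
instance (s : String) (number_start : Int) : Decidable (Pre_find_number_end_py s number_start) := by unfold Pre_find_number_end_py; infer_instance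

def pvWitness_find_number_end_py : String × Int := ("a12b", 0)

def Spec_find_number_end_py (s : String) (number_start : Int) (out : Int) : Prop := out = find_number_end_py_alt s number_start
instance (s : String) (number_start : Int) (out : Int) : Decidable (Spec_find_number_end_py s number_start out) := by unfold Spec_find_number_end_py; infer_instance

-- ===== CLAIM (what is proved, stated in full; the proofs are below) =====
def Claim_equal_find_number_end_py : Prop := ∀ (s : String) (number_start : Int), Dom_find_number_end_py s number_start → Pre_find_number_end_py s number_start → Spec_find_number_end_py s number_start (find_number_end_py s number_start)

-- ===== LEMMAS AND PROOFS =====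

lemma pv_mem_digit_strs (c : Char) :
    (String.ofList [c] ∈ (PySem.List.pyRange 0 10 1).map PySem.Int.toStr)
      ↔ (("0123456789".toList).contains c = true) := by
  have h1 : (PySem.List.pyRange 0 10 1).map PySem.Int.toStr
      = ["0","1","2","3","4","5","6","7","8","9"] := by decide
  have h2 : "0123456789".toList = ['0','1','2','3','4','5','6','7','8','9'] := by decide
  have key : ∀ d : Char, String.ofList [c] = String.ofList [d] ↔ c = d := by
    intro d
    constructor
    · intro h
      have := congrArg String.toList h
      simpa using this
    · intro h; rw [h]
  rw [h1, h2]
  have e0 : ("0" : String) = String.ofList ['0'] := by decide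
  have e1 : ("1" : String) = String.ofList ['1'] := by decide
  have e2 : ("2" : String) = String.ofList ['2'] := by decide
  have e3 : ("3" : String) = String.ofList ['3'] := by decide
  have e4 : ("4" : String) = String.ofList ['4'] := by decide
  have e5 : ("5" : String) = String.ofList ['5'] := by decide
  have e6 : ("6" : String) = String.ofList ['6'] := by decide
  have e7 : ("7" : String) = String.ofList ['7'] := by decide
  have e8 : ("8" : String) = String.ofList ['8'] := by decide
  have e9 : ("9" : String) = String.ofList ['9'] := by decide
  simp [e0, e1, e2, e3, e4, e5, e6, e7, e8, e9, key, List.contains_eq_mem]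

lemma pvLoopA_eq (l : List Char) (p fuel : Nat) (h : l.length ≤ p + fuel) :
    pvLoopA l ((PySem.List.pyRange 0 10 1).map PySem.Int.toStr) (p : Int) fuel
      = (p : Int) + (((l.drop p).takeWhile (fun c => ("0123456789".toList).contains c)).length : Int) := by
  induction fuel generalizing p with
  | zero =>
    have hd : l.drop p = [] := List.drop_eq_nil_of_le (by omega)
    simp [pvLoopA, hd]
  | succ fuel ih =>
    by_cases hp : p < l.length
    · have hget : PySem.List.pyGet? l (p : Int) = some l[p] := by
        simp [PySem.List.pyGet?_natCast, List.getElem?_eq_getElem hp]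
      have hdrop : l.drop p = l[p] :: l.drop (p + 1) := List.drop_eq_getElem_cons hp
      by_cases hdig : ("0123456789".toList).contains l[p] = true
      · have hmem : String.ofList [l[p]] ∈ (PySem.List.pyRange 0 10 1).map PySem.Int.toStr :=
          (pv_mem_digit_strs _).mpr hdig
        have hstep : ((p : Int) + 1) = ((p + 1 : Nat) : Int) := by push_cast; ring
        rw [pvLoopA]
        simp only [hget]
        rw [if_pos (by exact_mod_cast hp), if_pos hmem, hstep, ih (p + 1) (by omega)]
        rw [hdrop, List.takeWhile_cons, if_pos hdig]
        simp only [List.length_cons]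
        push_cast; ring
      · have hmem : ¬ (String.ofList [l[p]] ∈ (PySem.List.pyRange 0 10 1).map PySem.Int.toStr) := by
          intro hmem; exact hdig ((pv_mem_digit_strs _).mp hmem)
        rw [pvLoopA]
        simp only [hget]
        rw [if_pos (by exact_mod_cast hp), if_neg hmem]
        rw [hdrop, List.takeWhile_cons, if_neg hdig]
        simp
    · have hd : l.drop p = [] := List.drop_eq_nil_of_le (by omega)
      have hlt : ¬ ((p : Int) < (l.length : Int)) := by exact_mod_cast hp
      rw [pvLoopA, if_neg hlt]
      simp [hd]

lemma pv_take_drop_len (l : List Char) (p : Nat) (pred : Char → Bool) :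
    ((l.drop p).takeWhile pred).length + ((l.drop p).dropWhile pred).length = l.length - p := by
  calc ((l.drop p).takeWhile pred).length + ((l.drop p).dropWhile pred).length
      = (((l.drop p).takeWhile pred) ++ ((l.drop p).dropWhile pred)).length :=
        (List.length_append).symm
    _ = (l.drop p).length := by rw [List.takeWhile_append_dropWhile]
    _ = l.length - p := List.length_drop

-- ===== VERDICT (by name: the statement is the Claim_ definition above) =====
theorem find_number_end_py_spec : Claim_equal_find_number_end_py := by
  intro s number_start _ hpre
  unfold Spec_find_number_end_py find_number_end_py find_number_end_py_alt
  have h0 : (0 : Int) ≤ number_start + 1 := by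
    unfold Pre_find_number_end_py at hpre; omega
  set l := s.toList with hl
  set p : Nat := (number_start + 1).toNat with hp
  have hi : number_start + 1 = (p : Int) := by omega
  rw [hi]
  have hfuel : l.length ≤ p + (((l.length : Int) - (p : Int)).toNat + 1) := by omega
  rw [pvLoopA_eq l p _ hfuel]
  by_cases hge : ((p : Int) ≥ (l.length : Int))
  · have hd : l.drop p = [] := List.drop_eq_nil_of_le (by omega)
    rw [if_pos hge]
    simp [hd]
  · rw [if_neg hge]
    have hslice : PySem.List.slice l (some (p : Int)) none = l.drop p :=
      PySem.List.slice_from_natCast l p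
    rw [hslice]
    have hlen := pv_take_drop_len l p (fun c => ("0123456789".toList).contains c)
    have hplt : p < l.length := by omega
    omega
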